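-- pv_equiv track=rewrite | github.com/Boucher-David/tmrOverlay | skills/tmr-overlay-validation/scripts/check-csharp-member-duplicates.py | find_top_level_sequence
-- ===== SOURCE A (Python) =====
-- def find_top_level_sequence(text: str, sequence: str) -> int:
--     paren_depth = 0
--     bracket_depth = 0
--     brace_depth = 0
--     angle_depth = 0
--     index = 0
--     while index < len(text):
--         char = text[index]
--         if (
--             text.startswith(sequence, index)
--             and paren_depth == 0
--             and bracket_depth == 0
--             and brace_depth == 0
--             and angle_depth == 0
--         ):
--             return index
--         if char == "(":
--             paren_depth += 1
--         elif char == ")" and paren_depth > 0: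
--             paren_depth -= 1
--         elif char == "[":
--             bracket_depth += 1
--         elif char == "]" and bracket_depth > 0:
--             bracket_depth -= 1
--         elif char == "{":
--             brace_depth += 1
--         elif char == "}" and brace_depth > 0:
--             brace_depth -= 1
--         elif char == "<":
--             angle_depth += 1
--         elif char == ">" and angle_depth > 0:
--             angle_depth -= 1
--         index += 1
--     return -1
-- ===== SOURCE B (Python) =====
-- def find_top_level_sequence(text: str, sequence: str) -> int:
--     # One pass precomputes, for each index, whether all bracket depths are zero
--     # there; then str.find jumps straight between occurrences of sequence.
--     top = []
--     paren = bracket = brace = angle = 0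
--     for char in text:
--         top.append(paren == 0 and bracket == 0 and brace == 0 and angle == 0)
--         if char == "(":
--             paren += 1
--         elif char == ")" and paren > 0:
--             paren -= 1
--         elif char == "[":
--             bracket += 1
--         elif char == "]" and bracket > 0:
--             bracket -= 1
--         elif char == "{":
--             brace += 1
--         elif char == "}" and brace > 0:
--             brace -= 1
--         elif char == "<":
--             angle += 1
--         elif char == ">" and angle > 0:
--             angle -= 1
--     i = text.find(sequence)
--     while i != -1:
--         if i == 0 or top[i]:
--             return i
--         i = text.find(sequence, i + 1)
--     return -1
-- ===== Notes on version B (the rewrite author's own statement) =====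
-- stated objective: alternative
-- what changed: Instead of testing startswith at every index inside the scanning loop, B precomputes the depth-zero flag for every position in one pass and then uses str.find to jump directly between occurrences of sequence, checking the flag in O(1); the per-candidate startswith scan disappears.
-- intended difference: On text='' with sequence='' A's loop never runs and it returns -1 although the empty sequence occurs at top level at index 0; B returns 0 (the index str.find reports), which is the intended answer. — e.g. on find_top_level_sequence("", ""): A returns -1, B returns 0
import Mathlib
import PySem

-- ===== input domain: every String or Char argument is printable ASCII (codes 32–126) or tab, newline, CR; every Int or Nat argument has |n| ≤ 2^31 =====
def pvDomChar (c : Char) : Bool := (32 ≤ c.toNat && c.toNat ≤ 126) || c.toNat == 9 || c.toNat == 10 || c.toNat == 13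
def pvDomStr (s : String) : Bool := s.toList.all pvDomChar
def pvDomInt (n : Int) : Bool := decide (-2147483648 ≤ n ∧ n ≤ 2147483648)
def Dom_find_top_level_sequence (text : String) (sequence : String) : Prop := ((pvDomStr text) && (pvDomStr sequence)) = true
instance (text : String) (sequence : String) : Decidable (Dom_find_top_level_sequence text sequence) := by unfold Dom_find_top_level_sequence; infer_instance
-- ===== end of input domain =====

-- B precomputes the depth-zero flags in one pass and then jumps between occurrences
-- with str.find instead of testing startswith at every index (alternative algorithm).


-- ===== PORT A =====
-- A-side helper: the depth-update if/elif chain that is inlined in A's loop body.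
def pvAStep (p b c a : Nat) (ch : Char) : Nat × Nat × Nat × Nat :=
  if ch = '(' then (p + 1, b, c, a)
  else if ch = ')' ∧ p > 0 then (p - 1, b, c, a)
  else if ch = '[' then (p, b + 1, c, a)
  else if ch = ']' ∧ b > 0 then (p, b - 1, c, a)
  else if ch = '{' then (p, b, c + 1, a)
  else if ch = '}' ∧ c > 0 then (p, b, c - 1, a)
  else if ch = '<' then (p, b, c, a + 1)
  else if ch = '>' ∧ a > 0 then (p, b, c, a - 1)
  else (p, b, c, a)

-- A's while loop; the first argument list is the running suffix text[index:], so the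
-- loop guard index < len(text) is the [] case, and text.startswith(sequence, index)
-- (0 ≤ index ≤ len(text)) is exactly startswith on that suffix.
def pvALoop (seq : List Char) : List Char → Nat → Nat → Nat → Nat → Nat → Int
  | [], _, _, _, _, _ => -1
  | ch :: rest, p, b, c, a, index =>
      if PySem.Chars.startswith (ch :: rest) seq ∧ p = 0 ∧ b = 0 ∧ c = 0 ∧ a = 0 then
        (index : Int)
      else
        let s := pvAStep p b c a ch
        pvALoop seq rest s.1 s.2.1 s.2.2.1 s.2.2.2 (index + 1)

def find_top_level_sequence (text : String) (sequence : String) : Int :=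
  pvALoop sequence.toList text.toList 0 0 0 0 0

-- ===== PORT B =====
-- B-side helper: the depth-update if/elif chain of B's first pass.
def pvBStep (s : Nat × Nat × Nat × Nat) (ch : Char) : Nat × Nat × Nat × Nat :=
  match s with
  | (p, b, c, a) =>
    if ch = '(' then (p + 1, b, c, a)
    else if ch = ')' ∧ p > 0 then (p - 1, b, c, a)
    else if ch = '[' then (p, b + 1, c, a)
    else if ch = ']' ∧ b > 0 then (p, b - 1, c, a)
    else if ch = '{' then (p, b, c + 1, a)
    else if ch = '}' ∧ c > 0 then (p, b, c - 1, a)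
    else if ch = '<' then (p, b, c, a + 1)
    else if ch = '>' ∧ a > 0 then (p, b, c, a - 1)
    else (p, b, c, a)

-- B's first pass: top[i] = "all four depths are zero just before index i".
def pvTop (cs : List Char) : List Bool :=
  (cs.foldl
    (fun (st : List Bool × (Nat × Nat × Nat × Nat)) ch =>
      (st.1 ++ [decide (st.2 = ((0, 0, 0, 0) : Nat × Nat × Nat × Nat))], pvBStep st.2 ch))
    ([], (0, 0, 0, 0))).1

-- B's while loop over successive text.find(sequence, ·) results.  fuel = |text| + 2
-- bounds the number of iterations (the candidates strictly increase and stay ≤ |text|).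
-- Python's top[i] would raise if i were out of range; that is unreachable (i = 0 is
-- short-circuited and otherwise i < len(text)), so the none case defaults to false.
def pvBLoop (cs seq : List Char) (top : List Bool) : Nat → Int → Int
  | 0, _ => -1
  | fuel + 1, i =>
      if i = -1 then -1
      else if i = 0 ∨ (PySem.List.pyGet? top i).getD false = true then i
      else pvBLoop cs seq top fuel (PySem.Chars.findFrom cs seq (i + 1))

def find_top_level_sequence_alt (text : String) (sequence : String) : Int :=
  let cs := text.toList
  let seq := sequence.toList
  pvBLoop cs seq (pvTop cs) (cs.length + 2) (PySem.Chars.find cs seq)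

-- ===== PRECONDITION & SPEC =====
-- On text = "" with sequence = "" A's loop never runs and returns -1 although the empty
-- sequence occurs at top level at index 0; B returns 0, the index str.find reports.
def D_find_top_level_sequence (text : String) (sequence : String) : Prop :=
  text = "" ∧ sequence = ""
instance (text : String) (sequence : String) : Decidable (D_find_top_level_sequence text sequence) := by
  unfold D_find_top_level_sequence; infer_instance

def Spec_find_top_level_sequence (text : String) (sequence : String) (out : Int) : Prop :=
  ¬ D_find_top_level_sequence text sequence → out = find_top_level_sequence_alt text sequence
instance (text : String) (sequence : String) (out : Int) : Decidable (Spec_find_top_level_sequence text sequence out) := by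
  unfold Spec_find_top_level_sequence; infer_instance

def pvDiffWitness_find_top_level_sequence : String × String := ("", "")
def pvDiffWitnessOut_find_top_level_sequence : Int × Int := (-1, 0)

-- ===== CLAIM (what is proved, stated in full; the proofs are below) =====
def Claim_unchanged_find_top_level_sequence : Prop := ∀ (text : String) (sequence : String), Dom_find_top_level_sequence text sequence → Spec_find_top_level_sequence text sequence (find_top_level_sequence text sequence)
def Claim_changed_find_top_level_sequence : Prop := Dom_find_top_level_sequence (pvDiffWitness_find_top_level_sequence.1) (pvDiffWitness_find_top_level_sequence.2) ∧ D_find_top_level_sequence (pvDiffWitness_find_top_level_sequence.1) (pvDiffWitness_find_top_level_sequence.2) ∧ find_top_level_sequence (pvDiffWitness_find_top_level_sequence.1) (pvDiffWitness_find_top_level_sequence.2) = pvDiffWitnessOut_find_top_level_sequence.1 ∧ find_top_level_sequence_alt (pvDiffWitness_find_top_level_sequence.1) (pvDiffWitness_find_top_level_sequence.2) = pvDiffWitnessOut_find_top_level_sequence.2 ∧ pvDiffWitnessOut_find_top_level_sequence.1 ≠ pvDiffWitnessOut_find_top_level_sequence.2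
def Claim_exact_find_top_level_sequence : Prop := ∀ (text : String) (sequence : String), Dom_find_top_level_sequence text sequence → D_find_top_level_sequence text sequence → find_top_level_sequence text sequence ≠ find_top_level_sequence_alt text sequence

-- ===== LEMMAS AND PROOFS =====

-- Depth state after the first i characters.
def pvD (cs : List Char) (i : Nat) : Nat × Nat × Nat × Nat :=
  (cs.take i).foldl pvBStep (0, 0, 0, 0)

-- "index i is a top-level occurrence of seq".
def pvGoodb (cs seq : List Char) (i : Nat) : Bool :=
  PySem.Chars.startswith (cs.drop i) seq && decide (pvD cs i = (0, 0, 0, 0))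

-- Reference scan: first i' ≥ i with pvGoodb, else -1.
def pvRef (cs seq : List Char) (i : Nat) : Int :=
  if h : cs.length ≤ i then -1
  else if pvGoodb cs seq i then (i : Int) else pvRef cs seq (i + 1)
termination_by cs.length - i
decreasing_by omega

theorem pvAStep_eq (p b c a : Nat) (ch : Char) :
    pvAStep p b c a ch = pvBStep (p, b, c, a) ch := rfl

theorem pvD_zero (cs : List Char) : pvD cs 0 = (0, 0, 0, 0) := rfl

theorem pvD_succ (cs : List Char) (i : Nat) (h : i < cs.length) :
    pvD cs (i + 1) = pvBStep (pvD cs i) cs[i] := by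
  unfold pvD
  rw [List.take_add_one, List.getElem?_eq_getElem h]
  simp only [Option.toList_some, List.foldl_append, List.foldl_cons, List.foldl_nil]

theorem pvRef_none (cs seq : List Char) :
    ∀ k i, cs.length - i ≤ k → (∀ j, i ≤ j → pvGoodb cs seq j = false) →
      pvRef cs seq i = -1 := by
  intro k
  induction k with
  | zero =>
      intro i hk _
      rw [pvRef]; rw [dif_pos (by omega)]
  | succ k ih =>
      intro i hk hbad
      rw [pvRef]
      by_cases h : cs.length ≤ i
      · rw [dif_pos h]
      · rw [dif_neg h, if_neg (by simp [hbad i le_rfl])]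
        exact ih (i + 1) (by omega) (fun j hj => hbad j (by omega))

theorem pvRef_step (cs seq : List Char) (i : Nat) (h : pvGoodb cs seq i = false) :
    pvRef cs seq i = pvRef cs seq (i + 1) := by
  rw [pvRef]
  by_cases hl : cs.length ≤ i
  · rw [dif_pos hl]
    rw [pvRef, dif_pos (by omega)]
  · rw [dif_neg hl, if_neg (by simp [h])]

theorem pvRef_skip (cs seq : List Char) :
    ∀ d i, (∀ j, i ≤ j → j < i + d → pvGoodb cs seq j = false) →
      pvRef cs seq i = pvRef cs seq (i + d) := by
  intro d
  induction d with
  | zero => intro i _; rfl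
  | succ d ih =>
      intro i hbad
      rw [pvRef_step cs seq i (hbad i le_rfl (by omega))]
      have := ih (i + 1) (fun j hj hj' => hbad j (by omega) (by omega))
      rw [this]; ring_nf

theorem pvRef_hit (cs seq : List Char) (i : Nat) (hi : i < cs.length)
    (h : pvGoodb cs seq i = true) : pvRef cs seq i = (i : Int) := by
  rw [pvRef, dif_neg (by omega), if_pos h]

-- A's loop, run on the suffix text[i:] with the depth state after i characters,
-- computes the reference scan from i.
theorem pvALoop_eq_ref (cs seq : List Char) :
    ∀ k i, cs.length - i ≤ k →
      pvALoop seq (cs.drop i) (pvD cs i).1 (pvD cs i).2.1 (pvD cs i).2.2.1 (pvD cs i).2.2.2 i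
        = pvRef cs seq i := by
  intro k
  induction k with
  | zero =>
      intro i hk
      have h : cs.length ≤ i := by omega
      rw [List.drop_eq_nil_of_le h, pvRef, dif_pos h]
      rfl
  | succ k ih =>
      intro i hk
      by_cases h : cs.length ≤ i
      · rw [List.drop_eq_nil_of_le h, pvRef, dif_pos h]; rfl
      · have hlt : i < cs.length := by omega
        rcases hpd : pvD cs i with ⟨p, b, c, a⟩
        rw [List.drop_eq_getElem_cons hlt, pvALoop, ← List.drop_eq_getElem_cons hlt]
        by_cases hc : PySem.Chars.startswith (cs.drop i) seq = true ∧ p = 0 ∧ b = 0 ∧ c = 0 ∧ a = 0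
        · rw [if_pos hc]
          have hg : pvGoodb cs seq i = true := by
            unfold pvGoodb
            rw [hpd]
            obtain ⟨h1, h2, h3, h4, h5⟩ := hc
            simp [h1, h2, h3, h4, h5]
          rw [pvRef_hit cs seq i hlt hg]
        · rw [if_neg hc]
          have hg : pvGoodb cs seq i = false := by
            unfold pvGoodb
            rw [hpd]
            by_cases h1 : PySem.Chars.startswith (cs.drop i) seq = true
            · simp only [h1, Bool.true_and, decide_eq_false_iff_not, Prod.mk.injEq]
              intro h2
              exact hc ⟨h1, h2.1, h2.2.1, h2.2.2.1, h2.2.2.2⟩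
            · simp [Bool.eq_false_iff.mpr h1]
          have hst : pvAStep p b c a cs[i] = pvD cs (i + 1) := by
            rw [pvAStep_eq, ← hpd, ← pvD_succ cs i hlt]
          simp only [hst]
          rw [ih (i + 1) (by omega), pvRef_step cs seq i hg]

-- The first pass builds exactly the list of depth-zero flags.
theorem pvTop_aux (cs : List Char) :
    ∀ (acc : List Bool) (s : Nat × Nat × Nat × Nat),
      (cs.foldl
        (fun (st : List Bool × (Nat × Nat × Nat × Nat)) ch =>
          (st.1 ++ [decide (st.2 = ((0, 0, 0, 0) : Nat × Nat × Nat × Nat))], pvBStep st.2 ch))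
        (acc, s)).1
      = acc ++ (List.range cs.length).map
          (fun j => decide ((cs.take j).foldl pvBStep s = (0, 0, 0, 0))) := by
  induction cs with
  | nil => intro acc s; simp
  | cons c cs ih =>
      intro acc s
      simp only [List.foldl_cons, List.length_cons]
      rw [ih (acc ++ [decide (s = ((0, 0, 0, 0) : Nat × Nat × Nat × Nat))]) (pvBStep s c)]
      rw [List.range_succ_eq_map]
      simp [List.map_map, Function.comp]

theorem pvTop_eq (cs : List Char) :
    pvTop cs = (List.range cs.length).map (fun j => decide (pvD cs j = (0, 0, 0, 0))) := by
  unfold pvTop pvD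
  rw [pvTop_aux cs [] (0, 0, 0, 0)]
  simp

theorem pvTop_get (cs : List Char) (i : Nat) (h : i < cs.length) :
    (PySem.List.pyGet? (pvTop cs) (i : Int)).getD false
      = decide (pvD cs i = (0, 0, 0, 0)) := by
  rw [PySem.List.pyGet?_natCast, pvTop_eq]
  rw [List.getElem?_map, List.getElem?_range h]
  rfl

theorem pvBLoop_neg_one (cs seq : List Char) (top : List Bool) :
    ∀ fuel, pvBLoop cs seq top fuel (-1) = -1 := by
  intro fuel
  cases fuel <;> simp [pvBLoop]

-- B's jump loop, entered at a candidate i that is an occurrence of seq, computes the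
-- reference scan from i.
theorem pvBLoop_eq_ref (cs seq : List Char) (hseq : seq ≠ []) :
    ∀ fuel i, i < cs.length → seq <+: cs.drop i → cs.length + 1 - i ≤ fuel →
      pvBLoop cs seq (pvTop cs) fuel (i : Int) = pvRef cs seq i := by
  intro fuel
  induction fuel with
  | zero => intro i hi _ hf; omega
  | succ fuel ih =>
      intro i hi hpre hf
      rw [pvBLoop]
      rw [if_neg (by omega)]
      have htop := pvTop_get cs i hi
      by_cases hz : pvD cs i = (0, 0, 0, 0)
      · rw [if_pos ?_]
        · rw [pvRef_hit cs seq i hi ?_]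
          unfold pvGoodb
          simp [PySem.Chars.startswith_iff, hpre, hz]
        · right; rw [htop]; simp [hz]
      · have hcond : ¬ ((i : Int) = 0 ∨ (PySem.List.pyGet? (pvTop cs) (i : Int)).getD false = true) := by
          rintro (h0 | h1)
          · apply hz
            have : i = 0 := by exact_mod_cast h0
            rw [this]; rfl
          · rw [htop] at h1; simp at h1; exact hz h1
        rw [if_neg hcond]
        have hgi : pvGoodb cs seq i = false := by
          unfold pvGoodb; simp [hz]
        have hk1 : i + 1 ≤ cs.length := by omega
        have hcast : ((i : Int) + 1) = ((i + 1 : Nat) : Int) := by push_cast; ring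
        rw [hcast]
        by_cases hfind : PySem.Chars.findFrom cs seq ((i + 1 : Nat) : Int) = -1
        · rw [hfind]
          have hnone : ∀ j, i ≤ j → pvGoodb cs seq j = false := by
            intro j hj
            rcases Nat.eq_or_lt_of_le hj with rfl | hjlt
            · exact hgi
            · have hninf : ¬ seq <:+: cs.drop (i + 1) :=
                (PySem.Chars.findFrom_natCast_eq_neg_one_iff cs seq (i + 1) hk1).mp hfind
              have hdj : cs.drop j = (cs.drop (i + 1)).drop (j - (i + 1)) := by
                rw [List.drop_drop]
                congr 1
                omega
              have : ¬ seq <+: cs.drop j := by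
                intro hp
                apply hninf
                rw [hdj] at hp
                exact hp.isInfix.trans (List.drop_suffix _ _).isInfix
              unfold pvGoodb
              simp [PySem.Chars.startswith_iff, this]
          rw [pvBLoop_neg_one]
          exact (pvRef_none cs seq cs.length i (by omega) hnone).symm
        · obtain ⟨hge, hpre', hmin⟩ :=
            PySem.Chars.findFrom_natCast_spec cs seq (i + 1) hk1 hfind
          set j := (PySem.Chars.findFrom cs seq ((i + 1 : Nat) : Int)).toNat with hj
          have hjnn : 0 ≤ PySem.Chars.findFrom cs seq ((i + 1 : Nat) : Int) := by
            have : (0 : Int) ≤ (i + 1 : Nat) := by positivity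
            omega
          have hjcast : PySem.Chars.findFrom cs seq ((i + 1 : Nat) : Int) = (j : Int) := by
            rw [hj]; omega
          have hjge : i + 1 ≤ j := by
            rw [hj]; omega
          have hjlt : j < cs.length := by
            have hlen := hpre'.length_le
            rw [List.length_drop] at hlen
            have : 0 < seq.length := List.length_pos_iff.mpr hseq
            omega
          rw [hjcast]
          rw [ih j hjlt hpre' (by omega)]
          have hskip : ∀ l, i ≤ l → l < j → pvGoodb cs seq l = false := by
            intro l hl hlj
            rcases Nat.eq_or_lt_of_le hl with rfl | hllt
            · exact hgi
            · have : ¬ seq <+: cs.drop l := hmin l (by omega) hlj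
              unfold pvGoodb
              simp [PySem.Chars.startswith_iff, this]
          have := pvRef_skip cs seq (j - i) i (by intro l hl hl'; exact hskip l hl (by omega))
          rw [this]
          congr 1
          omega

theorem ports_agree_list (cs seq : List Char) (h : ¬ (cs = [] ∧ seq = [])) :
    pvALoop seq cs 0 0 0 0 0
      = pvBLoop cs seq (pvTop cs) (cs.length + 2) (PySem.Chars.find cs seq) := by
  by_cases hs : seq = []
  · -- sequence empty: text must be nonempty, both return 0
    have htext : cs ≠ [] := fun hnil => h ⟨hnil, hs⟩
    obtain ⟨c, rest, rfl⟩ := List.exists_cons_of_ne_nil htext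
    rw [hs]
    rw [pvALoop]
    rw [if_pos ?_]
    · have hfind : PySem.Chars.find (c :: rest) [] = 0 := PySem.Chars.find_nil _
      have h2 : (c :: rest).length + 2 = ((c :: rest).length + 1) + 1 := rfl
      rw [hfind, h2, pvBLoop]
      rw [if_neg (by omega), if_pos (Or.inl rfl)]
      simp
    · exact ⟨by rw [PySem.Chars.startswith_iff]; exact List.nil_prefix, rfl, rfl, rfl, rfl⟩
  · -- sequence nonempty: both sides compute pvRef cs seq 0
    have hA : pvALoop seq cs 0 0 0 0 0 = pvRef cs seq 0 := by
      have := pvALoop_eq_ref cs seq cs.length 0 (by omega)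
      simpa [pvD_zero] using this
    rw [hA]
    by_cases hfind : PySem.Chars.find cs seq = -1
    · -- no occurrence at all: both -1
      rw [hfind, pvBLoop_neg_one]
      have hninf : ¬ seq <:+: cs := (PySem.Chars.find_eq_neg_one_iff cs seq).mp hfind
      refine pvRef_none cs seq cs.length 0 (by omega) ?_
      intro j _
      have : ¬ seq <+: cs.drop j := fun hp =>
        hninf ((PySem.Chars.isIn_iff_infix seq cs).mp
          ((PySem.Chars.exists_prefix_drop_iff_isIn seq cs).mp ⟨j, hp⟩))
      unfold pvGoodb
      simp [PySem.Chars.startswith_iff, this]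
    · have hnn : 0 ≤ PySem.Chars.find cs seq := by
        have := PySem.Chars.neg_one_le_find cs seq
        omega
      obtain ⟨hpre, hmin⟩ := PySem.Chars.find_spec hnn
      have hcast : PySem.Chars.find cs seq = (((PySem.Chars.find cs seq).toNat : Nat) : Int) := by
        omega
      set i0 := (PySem.Chars.find cs seq).toNat with hi0
      have hi0lt : i0 < cs.length := by
        have hlen := hpre.length_le
        rw [List.length_drop] at hlen
        have : 0 < seq.length := List.length_pos_iff.mpr hs
        omega
      rw [hcast]
      rw [pvBLoop_eq_ref cs seq hs (cs.length + 2) i0 hi0lt hpre (by omega)]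
      have hskip := pvRef_skip cs seq i0 0 (by
        intro l _ hl
        have : ¬ seq <+: cs.drop l := hmin l (by omega)
        unfold pvGoodb
        simp [PySem.Chars.startswith_iff, this])
      simpa using hskip

theorem toList_nil_iff (s : String) : s.toList = [] ↔ s = "" := by
  constructor
  · intro h
    have h2 := @String.ofList_toList s
    rw [h] at h2
    exact h2.symm
  · intro h; rw [h]; rfl

theorem ports_agree (text sequence : String)
    (hD : ¬ D_find_top_level_sequence text sequence) :
    find_top_level_sequence text sequence = find_top_level_sequence_alt text sequence := by
  unfold find_top_level_sequence find_top_level_sequence_alt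
  apply ports_agree_list
  intro ⟨h1, h2⟩
  exact hD ⟨(toList_nil_iff text).mp h1, (toList_nil_iff sequence).mp h2⟩

-- ===== VERDICT (by name: the statement is the Claim_ definition above) =====
theorem find_top_level_sequence_spec : Claim_unchanged_find_top_level_sequence := by
  intro text sequence _ hD
  exact ports_agree text sequence hD

theorem find_top_level_sequence_changed : Claim_changed_find_top_level_sequence := by
  unfold Claim_changed_find_top_level_sequence; decide

theorem find_top_level_sequence_tight : Claim_exact_find_top_level_sequence := by
  intro text sequence _ hD
  obtain ⟨h1, h2⟩ := hD
  subst h1; subst h2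
  decide
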